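-- pv_equiv track=rewrite | github.com/TurtleSmoke/Advent-of-Code | 2024/day_07/main.py | dfs
-- ===== SOURCE A (Python) =====
-- def dfs(numbers, part2):
--     if len(numbers) == 1:
--         yield numbers[0]
--         return
--
--     for res in dfs(numbers[:-1], part2):
--         yield numbers[-1] * res
--         yield numbers[-1] + res
--         if part2:
--             yield int(str(res) + str(numbers[-1]))
-- ===== SOURCE B (Python) =====
-- def dfs(numbers, part2):
--     results = [numbers[0]]
--     for n in numbers[1:]:
--         new_results = []
--         for res in results:
--             new_results.append(n * res)
--             new_results.append(n + res)
--             if part2: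
--                 new_results.append(int(str(res) + str(n)))
--         results = new_results
--     yield from results
-- ===== Notes on version B (the rewrite author's own statement) =====
-- stated objective: alternative
-- what changed: Replaces the right-peeling recursive generator (recursing on numbers[:-1]) with a single left-to-right iterative accumulator loop that rebuilds the results list for each subsequent number.
import Mathlib
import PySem

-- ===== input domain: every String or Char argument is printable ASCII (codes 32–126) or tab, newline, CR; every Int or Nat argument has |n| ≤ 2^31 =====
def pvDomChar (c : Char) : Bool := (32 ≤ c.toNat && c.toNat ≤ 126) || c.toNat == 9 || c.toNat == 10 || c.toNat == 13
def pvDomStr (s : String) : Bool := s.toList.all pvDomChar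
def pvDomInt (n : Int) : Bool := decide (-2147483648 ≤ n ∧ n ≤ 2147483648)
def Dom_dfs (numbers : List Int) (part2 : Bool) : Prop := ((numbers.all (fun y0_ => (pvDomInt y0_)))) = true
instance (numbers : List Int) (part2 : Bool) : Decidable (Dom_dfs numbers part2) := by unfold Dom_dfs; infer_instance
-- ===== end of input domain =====

-- B is an iterative accumulator instead of A's right-peeling recursion; same value order, no recursion.

-- shared primitive: int(str(res) + str(n)); exact on Pre_ (there n ≥ 0, so the
-- concatenated string is a valid int literal and ofStr? is some)
def pyCat (res n : Int) : Int :=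
  (PySem.Int.ofStr? (PySem.Int.toStr res ++ PySem.Int.toStr n)).getD 0

-- ===== PORT A =====
def dfs (numbers : List Int) (part2 : Bool) : List Int :=
  if h1 : numbers.length = 1 then
    [PySem.List.pyGetD numbers 0 0]
  else if h0 : numbers = [] then
    []   -- Python recurses forever here (RecursionError); excluded by Pre_
  else
    (dfs (PySem.List.slice numbers none (some (-1))) part2).flatMap (fun res =>
      [PySem.List.pyGetD numbers (-1) 0 * res,
       PySem.List.pyGetD numbers (-1) 0 + res] ++
      (if part2 then [pyCat res (PySem.List.pyGetD numbers (-1) 0)] else []))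
termination_by numbers.length
decreasing_by
  simp only [PySem.List.slice_to_neg_one, List.length_dropLast]
  have : numbers.length ≠ 0 := fun h => h0 (List.eq_nil_of_length_eq_zero h)
  omega

-- ===== PORT B =====
def dfs_alt (numbers : List Int) (part2 : Bool) : List Int :=
  match numbers with
  | [] => []   -- Python raises IndexError on numbers[0]; excluded by Pre_
  | x :: rest =>
    rest.foldl (fun results n =>
      results.flatMap (fun res =>
        [n * res, n + res] ++ (if part2 then [pyCat res n] else []))) [x]

-- ===== PRECONDITION & SPEC =====
-- Pre_ excludes exactly the inputs where Python A raises: the empty list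
-- (unbounded recursion) and, when part2, a negative number after the first
-- (int("…-…") is a ValueError).
def Pre_dfs (numbers : List Int) (part2 : Bool) : Prop :=
  numbers ≠ [] ∧ (part2 = true → ∀ x ∈ numbers.tail, 0 ≤ x)
instance (numbers : List Int) (part2 : Bool) : Decidable (Pre_dfs numbers part2) := by
  unfold Pre_dfs; infer_instance

def pvWitness_dfs : List Int × Bool := ([3, 2, 5], true)

def Spec_dfs (numbers : List Int) (part2 : Bool) (out : List Int) : Prop := out = dfs_alt numbers part2
instance (numbers : List Int) (part2 : Bool) (out : List Int) : Decidable (Spec_dfs numbers part2 out) := by unfold Spec_dfs; infer_instance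

-- ===== CLAIM (what is proved, stated in full; the proofs are below) =====
def Claim_equal_dfs : Prop := ∀ (numbers : List Int) (part2 : Bool), Dom_dfs numbers part2 → Pre_dfs numbers part2 → Spec_dfs numbers part2 (dfs numbers part2)

-- ===== LEMMAS AND PROOFS =====

def pvStep (part2 : Bool) (results : List Int) (n : Int) : List Int :=
  results.flatMap (fun res =>
    [n * res, n + res] ++ (if part2 then [pyCat res n] else []))

lemma dfs_snoc (xs : List Int) (n : Int) (part2 : Bool) (hxs : xs ≠ []) :
    dfs (xs ++ [n]) part2 = pvStep part2 (dfs xs part2) n := by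
  rw [dfs]
  have hlen : xs.length ≠ 0 := fun h => hxs (List.eq_nil_of_length_eq_zero h)
  rw [dif_neg (by simp; omega), dif_neg (by simp)]
  simp only [PySem.List.slice_to_neg_one, List.dropLast_concat,
    PySem.List.pyGetD_neg_one_append_singleton, pvStep]

lemma dfs_alt_snoc (xs : List Int) (n : Int) (part2 : Bool) (hxs : xs ≠ []) :
    dfs_alt (xs ++ [n]) part2 = pvStep part2 (dfs_alt xs part2) n := by
  obtain ⟨x, rest, rfl⟩ := List.exists_cons_of_ne_nil hxs
  simp only [dfs_alt, List.cons_append, List.foldl_append, List.foldl_cons, List.foldl_nil, pvStep]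

lemma dfs_single (x : Int) (part2 : Bool) : dfs [x] part2 = [x] := by
  rw [dfs]; simp [PySem.List.pyGetD_zero_cons]

lemma dfs_eq_alt (xs : List Int) (part2 : Bool) (hxs : xs ≠ []) :
    dfs xs part2 = dfs_alt xs part2 := by
  induction xs using List.reverseRecOn with
  | nil => exact absurd rfl hxs
  | append_singleton ys n ih =>
    cases ys with
    | nil => simp [dfs_single, dfs_alt]
    | cons y rest =>
      rw [dfs_snoc _ _ _ (by simp), dfs_alt_snoc _ _ _ (by simp), ih (by simp)]

-- ===== VERDICT (by name: the statement is the Claim_ definition above) =====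
theorem dfs_spec : Claim_equal_dfs := by
  intro numbers part2 _ hpre
  exact dfs_eq_alt numbers part2 hpre.1
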